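-- pv_equiv track=rewrite | github.com/GustavoCha/app-lab | filters/discount_filter.py | _keyword_matches
-- ===== SOURCE A (Python) =====
-- KEYWORD_TOKEN_EQUIVALENTS = {
--     "televisor": {"televisor", "tv"},
--     "tv": {"televisor", "tv"},
-- }
--
-- def _keyword_matches(haystack: str, keyword: str) -> bool:
--     """Match normalized words or phrases against the normalized product name."""
--
--     normalized = " ".join(keyword.strip().split())
--     if not normalized or not haystack:
--         return False
--
--     haystack_tokens = haystack.split()
--     keyword_tokens = normalized.split()
--     if not keyword_tokens:
--         return False
--
--     if len(keyword_tokens) == 1: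
--         token = keyword_tokens[0]
--         equivalents = KEYWORD_TOKEN_EQUIVALENTS.get(token, {token})
--         return any(haystack_token in equivalents for haystack_token in haystack_tokens)
--
--     normalized_haystack = " ".join(haystack_tokens)
--     normalized_keyword = " ".join(keyword_tokens)
--     if normalized_keyword in normalized_haystack:
--         return True
--
--     for start in range(0, len(haystack_tokens) - len(keyword_tokens) + 1):
--         window = haystack_tokens[start:start + len(keyword_tokens)]
--         if all(
--             window_token in KEYWORD_TOKEN_EQUIVALENTS.get(keyword_token, {keyword_token})
--             for window_token, keyword_token in zip(window, keyword_tokens)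
--         ):
--             return True
--     return False
-- ===== SOURCE B (Python) =====
-- def _canon(token):
--     """Canonical form of a token: 'tv' and 'televisor' share one form."""
--     return "tv" if token in ("tv", "televisor") else token
--
--
-- def _keyword_matches(haystack: str, keyword: str) -> bool:
--     """Match normalized words or phrases against the normalized product name."""
--
--     keyword_tokens = keyword.split()
--     if not keyword_tokens or not haystack:
--         return False
--
--     haystack_tokens = haystack.split()
--
--     if len(keyword_tokens) == 1:
--         target = _canon(keyword_tokens[0])
--         return any(_canon(token) == target for token in haystack_tokens)
--
--     if " ".join(keyword_tokens) in " ".join(haystack_tokens):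
--         return True
--
--     padded_haystack = " " + " ".join(map(_canon, haystack_tokens)) + " "
--     padded_keyword = " " + " ".join(map(_canon, keyword_tokens)) + " "
--     return padded_keyword in padded_haystack
-- ===== Notes on version B (the rewrite author's own statement) =====
-- stated objective: simpler
-- what changed: Replaces the equivalents-dict plus explicit sliding-window zip/all loop by a token canonicalization ('tv'/'televisor' collapse to one form) followed by a single space-padded substring test on the canonical joined strings; the single-token branch becomes a canonical-form comparison.
import Mathlib
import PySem

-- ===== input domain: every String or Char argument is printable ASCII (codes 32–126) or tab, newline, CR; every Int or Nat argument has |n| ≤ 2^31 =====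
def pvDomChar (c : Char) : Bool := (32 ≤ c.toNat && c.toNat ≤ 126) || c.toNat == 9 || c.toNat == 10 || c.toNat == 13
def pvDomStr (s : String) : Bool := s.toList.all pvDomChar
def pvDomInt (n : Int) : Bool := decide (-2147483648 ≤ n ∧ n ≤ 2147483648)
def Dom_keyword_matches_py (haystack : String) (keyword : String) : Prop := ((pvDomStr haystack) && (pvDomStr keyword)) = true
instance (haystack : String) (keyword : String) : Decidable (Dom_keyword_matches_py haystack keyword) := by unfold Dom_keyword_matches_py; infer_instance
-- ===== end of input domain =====

-- ===== PORT A =====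
-- B changes: equivalents-dict + sliding-window loop replaced by token canonicalization and
-- one space-padded substring test on the canonical joined strings (objective: simpler).
def KEYWORD_TOKEN_EQUIVALENTS : PySem.Dict String (PySem.Set String) := PySem.Dict.ofList
  [("televisor", PySem.Set.ofList ["televisor", "tv"]),
   ("tv", PySem.Set.ofList ["televisor", "tv"])]

def keyword_matches_py (haystack : String) (keyword : String) : Bool :=
  let normalized := PySem.Str.join " " (PySem.Str.split₀ (PySem.Str.strip keyword))
  if PySem.Str.len normalized == 0 || PySem.Str.len haystack == 0 then false
  else
    let haystack_tokens := PySem.Str.split₀ haystack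
    let keyword_tokens := PySem.Str.split₀ normalized
    if keyword_tokens.length == 0 then false
    else if keyword_tokens.length == 1 then
      -- keyword_tokens[0]; the branch guarantees the list is a singleton
      let token := keyword_tokens.headD ""
      let equivalents := PySem.Dict.getD KEYWORD_TOKEN_EQUIVALENTS token (PySem.Set.ofList [token])
      haystack_tokens.any (fun haystack_token => PySem.Set.contains equivalents haystack_token)
    else
      let normalized_haystack := PySem.Str.join " " haystack_tokens
      let normalized_keyword := PySem.Str.join " " keyword_tokens
      if PySem.Str.isIn normalized_keyword normalized_haystack then true
      else
        -- 'for start in range(...): if all(...): return True / return False' is an 'any' over the range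
        (PySem.List.pyRange 0 ((haystack_tokens.length : Int) - (keyword_tokens.length : Int) + 1)).any
          (fun start =>
            let window := PySem.List.slice haystack_tokens (some start)
              (some (start + (keyword_tokens.length : Int)))
            (window.zip keyword_tokens).all (fun p =>
              PySem.Set.contains
                (PySem.Dict.getD KEYWORD_TOKEN_EQUIVALENTS p.2 (PySem.Set.ofList [p.2])) p.1))

-- ===== PORT B =====
def pvCanon (token : String) : String :=
  if token == "tv" || token == "televisor" then "tv" else token

def keyword_matches_py_alt (haystack : String) (keyword : String) : Bool :=
  let keyword_tokens := PySem.Str.split₀ keyword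
  if keyword_tokens.length == 0 || PySem.Str.len haystack == 0 then false
  else
    let haystack_tokens := PySem.Str.split₀ haystack
    if keyword_tokens.length == 1 then
      let target := pvCanon (keyword_tokens.headD "")
      haystack_tokens.any (fun token => pvCanon token == target)
    else if PySem.Str.isIn (PySem.Str.join " " keyword_tokens) (PySem.Str.join " " haystack_tokens) then
      true
    else
      let padded_haystack := " " ++ PySem.Str.join " " (haystack_tokens.map pvCanon) ++ " "
      let padded_keyword := " " ++ PySem.Str.join " " (keyword_tokens.map pvCanon) ++ " "
      PySem.Str.isIn padded_keyword padded_haystack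

-- ===== PRECONDITION & SPEC =====
def Spec_keyword_matches_py (haystack : String) (keyword : String) (out : Bool) : Prop := out = keyword_matches_py_alt haystack keyword
instance (haystack : String) (keyword : String) (out : Bool) : Decidable (Spec_keyword_matches_py haystack keyword out) := by unfold Spec_keyword_matches_py; infer_instance

-- ===== CLAIM (what is proved, stated in full; the proofs are below) =====
def Claim_equal_keyword_matches_py : Prop := ∀ (haystack : String) (keyword : String), Dom_keyword_matches_py haystack keyword → Spec_keyword_matches_py haystack keyword (keyword_matches_py haystack keyword)

-- ===== LEMMAS AND PROOFS =====

-- `not isspace`, and a clean reference implementation of str.split()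
def pvNons (c : Char) : Bool := !PySem.Chars.isspace c

def pvSplit : List Char → List (List Char)
  | [] => []
  | c :: rest =>
    if PySem.Chars.isspace c then pvSplit rest
    else (c :: rest.takeWhile pvNons) :: pvSplit (rest.dropWhile pvNons)
termination_by s => s.length
decreasing_by
  all_goals have := List.length_dropWhile_le (p := pvNons) (l := rest)
  all_goals simp_all


-- right-padded flattening: every token followed by one space
def pvRpad : List (List Char) → List Char
  | [] => []
  | t :: ts => t ++ ' ' :: pvRpad ts

-- a clean token: nonempty, no whitespace characters
def pvClean (t : List Char) : Prop := t ≠ [] ∧ ∀ c ∈ t, pvNons c = true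

theorem pvGo_spec (s cur : List Char) (acc : List (List Char)) : PySem.Chars.split₀.go s cur acc =
    acc.reverse ++ (if cur.isEmpty then pvSplit s
      else (cur.reverse ++ s.takeWhile pvNons) :: pvSplit (s.dropWhile pvNons)) := by
  induction s generalizing cur acc with
  | nil =>
    by_cases hc : cur.isEmpty <;>
      simp [PySem.Chars.split₀.go, hc, pvSplit]
  | cons c rest ih =>
    by_cases hsp : PySem.Chars.isspace c
    · by_cases hc : cur.isEmpty
      · rw [show cur = [] from by simpa using hc] at *
        simp [PySem.Chars.split₀.go, hsp, ih, pvSplit]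
      · simp only [PySem.Chars.split₀.go, hsp, hc, if_neg, Bool.false_eq_true,
          not_false_iff, ite_true, ih]
        simp [pvSplit, hsp, pvNons]
    · simp only [PySem.Chars.split₀.go, hsp, Bool.false_eq_true, ite_false, ih]
      by_cases hc : cur.isEmpty
      · rw [show cur = [] from by simpa using hc]
        simp [pvSplit, hsp]
      · simp [hsp, hc, pvNons]

theorem pvSplit₀_eq (s : List Char) : PySem.Chars.split₀ s = pvSplit s := by
  simp [PySem.Chars.split₀, pvGo_spec]

theorem pvSplit_clean {s : List Char} : ∀ t ∈ pvSplit s, pvClean t := by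
  induction s using pvSplit.induct with
  | case1 => simp [pvSplit]
  | case2 c rest hsp ih => simpa [pvSplit, hsp] using ih
  | case3 c rest hsp ih =>
    intro t ht
    rw [pvSplit, if_neg hsp] at ht
    rcases List.mem_cons.mp ht with h | h
    · subst h
      refine ⟨by simp, ?_⟩
      intro x hx
      rcases List.mem_cons.mp hx with h | h
      · subst h; simp [pvNons, hsp]
      · exact List.mem_takeWhile_imp h
    · exact ih t h

-- takeWhile/dropWhile across an all-nonspace prefix
theorem pvTW {l : List Char} (hl : ∀ c ∈ l, pvNons c = true) (r : List Char) :
    (l ++ r).takeWhile pvNons = l ++ r.takeWhile pvNons := by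
  induction l with
  | nil => simp
  | cons c l ih =>
    simp only [List.cons_append, List.takeWhile_cons, hl c (by simp)]
    simp [ih (fun c hc => hl c (by simp [hc]))]

theorem pvDW {l : List Char} (hl : ∀ c ∈ l, pvNons c = true) (r : List Char) :
    (l ++ r).dropWhile pvNons = r.dropWhile pvNons := by
  induction l with
  | nil => simp
  | cons c l ih =>
    simp only [List.cons_append, List.dropWhile_cons, hl c (by simp)]
    simp [ih (fun c hc => hl c (by simp [hc]))]

theorem pvSplit_all_space {w : List Char} (hw : ∀ c ∈ w, PySem.Chars.isspace c = true) :
    pvSplit w = [] := by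
  induction w with
  | nil => simp [pvSplit]
  | cons c w ih =>
    rw [pvSplit, if_pos (hw c (by simp))]
    exact ih (fun c hc => hw c (by simp [hc]))

-- str.split() ignores an all-whitespace prefix
theorem pvSplit_space_prefix {w : List Char} (hw : ∀ c ∈ w, PySem.Chars.isspace c = true)
    (s : List Char) : pvSplit (w ++ s) = pvSplit s := by
  induction w with
  | nil => simp
  | cons c w ih =>
    rw [List.cons_append, pvSplit, if_pos (hw c (by simp))]
    exact ih (fun c hc => hw c (by simp [hc]))

-- str.split() ignores an all-whitespace suffix
theorem pvSplit_space_suffix {w : List Char} (hw : ∀ c ∈ w, PySem.Chars.isspace c = true)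
    (s : List Char) : pvSplit (s ++ w) = pvSplit s := by
  induction s using pvSplit.induct with
  | case1 =>
    rw [List.nil_append, pvSplit_all_space hw]
    exact (pvSplit_all_space (by simp)).symm
  | case2 c rest hsp ih =>
    rw [List.cons_append, pvSplit, if_pos hsp, ih, pvSplit, if_pos hsp]
  | case3 c rest hsp ih =>
    rw [List.cons_append, pvSplit, if_neg hsp, pvSplit, if_neg hsp]
    by_cases hall : ∀ x ∈ rest, pvNons x = true
    · have h1 : (rest ++ w).takeWhile pvNons = rest ++ w.takeWhile pvNons := pvTW hall w
      have h2 : w.takeWhile pvNons = [] := by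
        cases w with
        | nil => simp
        | cons d w' =>
          rw [List.takeWhile_cons, if_neg]
          simp [pvNons, hw d (by simp)]
      have h3 : (rest ++ w).dropWhile pvNons = w.dropWhile pvNons := pvDW hall w
      have h4 : w.dropWhile pvNons = w := by
        cases w with
        | nil => simp
        | cons d w' =>
          rw [List.dropWhile_cons, if_neg]
          simp [pvNons, hw d (by simp)]
      have h5 : rest.takeWhile pvNons = rest := List.takeWhile_eq_self_iff.mpr hall
      have h6 : rest.dropWhile pvNons = [] := List.dropWhile_eq_nil_iff.mpr hall
      rw [h1, h2, h3, h4, h5, h6]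
      simp [pvSplit_all_space hw, pvSplit]
    · push Not at hall
      obtain ⟨x, hx, hxn⟩ := hall
      obtain ⟨l1, l2, hrest⟩ := List.mem_iff_append.mp hx
      have hne : (rest.takeWhile pvNons).length ≠ rest.length := by
        intro hlen
        have := List.takeWhile_eq_self_iff.mp
          ((List.takeWhile_prefix (p := pvNons) (l := rest)).eq_of_length hlen)
        exact (by simp [this x hx] at hxn)
      have h1 : (rest ++ w).takeWhile pvNons = rest.takeWhile pvNons := by
        rw [List.takeWhile_append, if_neg hne]
      have hde : (rest.dropWhile pvNons).isEmpty = false := by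
        rcases hde' : rest.dropWhile pvNons with _ | _
        · exact absurd ((List.takeWhile_eq_self_iff.mp (by
            have := List.takeWhile_append_dropWhile (p := pvNons) (l := rest)
            rw [hde'] at this; simpa using this)) x hx) (by simp [hxn])
        · simp
      have h3 : (rest ++ w).dropWhile pvNons = rest.dropWhile pvNons ++ w := by
        rw [List.dropWhile_append, if_neg (by simp [hde])]
      rw [h1, h3, ih]

theorem pvSplit_strip (s : List Char) : pvSplit (PySem.Chars.strip s) = pvSplit s := by
  have hl : pvSplit (PySem.Chars.lstrip s) = pvSplit s := by
    conv_rhs => rw [show s = s.takeWhile PySem.Chars.isspace ++ s.dropWhile PySem.Chars.isspace from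
      (List.takeWhile_append_dropWhile).symm]
    rw [pvSplit_space_prefix (fun c hc => List.mem_takeWhile_imp hc)]
    rfl
  have hr : ∀ t : List Char, pvSplit (PySem.Chars.rstrip t) = pvSplit t := by
    intro t
    conv_rhs => rw [show t = PySem.Chars.rstrip t ++ (t.reverse.takeWhile PySem.Chars.isspace).reverse from by
      rw [PySem.Chars.rstrip, ← List.reverse_append, List.takeWhile_append_dropWhile,
        List.reverse_reverse]]
    rw [pvSplit_space_suffix (fun c hc => List.mem_takeWhile_imp (List.mem_reverse.mp hc))]
  rw [PySem.Chars.strip, hr, hl]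

-- split is a left inverse of ' '-join on clean tokens
theorem pvSplit_join {ts : List (List Char)} (h : ∀ t ∈ ts, pvClean t) :
    pvSplit (PySem.Chars.join [' '] ts) = ts := by
  induction ts with
  | nil => simp [PySem.Chars.join, List.intercalate, pvSplit]
  | cons t ts ih =>
    rcases t with _ | ⟨c, cs⟩
    · exact absurd rfl (h [] (by simp)).1
    have hcn : pvNons c = true := (h (c :: cs) (by simp)).2 c (by simp)
    have hcs : ∀ x ∈ cs, pvNons x = true :=
      fun x hx => (h (c :: cs) (by simp)).2 x (by simp [hx])
    have hsp : ¬ PySem.Chars.isspace c = true := by simpa [pvNons] using hcn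
    cases ts with
    | nil =>
      rw [PySem.Chars.join_singleton, pvSplit, if_neg hsp,
        List.takeWhile_eq_self_iff.mpr hcs, List.dropWhile_eq_nil_iff.mpr hcs]
      simp [pvSplit]
    | cons b l =>
      rw [PySem.Chars.join_cons_cons]
      have happ : (c :: cs) ++ [' '] ++ PySem.Chars.join [' '] (b :: l)
          = c :: (cs ++ ' ' :: PySem.Chars.join [' '] (b :: l)) := by simp
      rw [happ, pvSplit, if_neg hsp, pvTW hcs, pvDW hcs]
      have hsp' : PySem.Chars.isspace ' ' = true := by decide
      have htw : (' ' :: PySem.Chars.join [' '] (b :: l)).takeWhile pvNons = [] := by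
        rw [List.takeWhile_cons, if_neg (by simp [pvNons, hsp'])]
      have hdw : (' ' :: PySem.Chars.join [' '] (b :: l)).dropWhile pvNons
          = ' ' :: PySem.Chars.join [' '] (b :: l) := by
        rw [List.dropWhile_cons, if_neg (by simp [pvNons, hsp'])]
      rw [htw, hdw, pvSplit, if_pos hsp', ih (fun t ht => h t (by simp [ht]))]
      simp

theorem pvJoin_eq_nil {ts : List (List Char)} (h : ∀ t ∈ ts, pvClean t) :
    PySem.Chars.join [' '] ts = [] ↔ ts = [] := by
  cases ts with
  | nil => simp [PySem.Chars.join_nil]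
  | cons t ts =>
    simp only [iff_false, reduceCtorEq]
    cases ts with
    | nil =>
      rw [PySem.Chars.join_singleton]
      exact fun hc => (h t (by simp)).1 hc
    | cons b l =>
      rw [PySem.Chars.join_cons_cons]
      intro hc
      exact (h t (by simp)).1 (by simpa using (List.append_eq_nil_iff.mp
        (List.append_eq_nil_iff.mp hc).1).1)

-- membership in A's equivalents set is equality of B's canonical forms
theorem pvEquiv_eq (w k : String) :
    PySem.Set.contains (PySem.Dict.getD KEYWORD_TOKEN_EQUIVALENTS k (PySem.Set.ofList [k])) w
      = (pvCanon w == pvCanon k) := by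
  have hKT : KEYWORD_TOKEN_EQUIVALENTS
      = PySem.Dict.mk [("televisor", ["televisor", "tv"]), ("tv", ["televisor", "tv"])] := by
    decide
  rw [hKT]
  by_cases h1 : k = "televisor"
  · subst h1
    by_cases hw1 : w = "tv" <;> by_cases hw2 : w = "televisor" <;>
      simp_all [PySem.Dict.getD, PySem.Dict.get?, PySem.Set.contains, List.find?, pvCanon,
        PySem.Set.ofList, PySem.Set.add, PySem.Set.empty, List.contains_eq_mem]
  · by_cases h2 : k = "tv"
    · subst h2
      by_cases hw1 : w = "tv" <;> by_cases hw2 : w = "televisor" <;>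
        simp_all [PySem.Dict.getD, PySem.Dict.get?, PySem.Set.contains, List.find?, pvCanon,
          PySem.Set.ofList, PySem.Set.add, PySem.Set.empty, List.contains_eq_mem]
    · have e1 : ("televisor" == k) = false := beq_eq_false_iff_ne.mpr (Ne.symm h1)
      have e2 : ("tv" == k) = false := beq_eq_false_iff_ne.mpr (Ne.symm h2)
      simp only [PySem.Dict.getD, PySem.Dict.get?, List.find?, e1, e2]
      by_cases hw1 : w = "tv" <;> by_cases hw2 : w = "televisor" <;>
        simp_all [PySem.Set.contains, PySem.Set.ofList, PySem.Set.add, PySem.Set.empty,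
          List.contains_eq_mem, pvCanon, beq_eq_false_iff_ne]
      all_goals (by_cases hwk : w = k <;> simp [hwk])

-- zip/all over equal-length lists is equality of the mapped lists
theorem pvZipAll_eq {as bs : List String} (h : as.length = bs.length) :
    ((as.zip bs).all (fun p => pvCanon p.1 == pvCanon p.2) = true) ↔
      as.map pvCanon = bs.map pvCanon := by
  induction as generalizing bs with
  | nil => cases bs <;> simp_all
  | cons a as ih =>
    cases bs with
    | nil => simp_all
    | cons b bs =>
      simp only [List.zip_cons_cons, List.all_cons, List.map_cons, Bool.and_eq_true,
        beq_iff_eq, List.cons.injEq]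
      exact and_congr Iff.rfl (ih (by simpa using h))

-- the padded form of a nonempty token list
theorem pvPad_eq {ts : List (List Char)} (h : ts ≠ []) :
    [' '] ++ PySem.Chars.join [' '] ts ++ [' '] = ' ' :: pvRpad ts := by
  induction ts with
  | nil => exact absurd rfl h
  | cons t ts ih =>
    cases ts with
    | nil => simp [PySem.Chars.join_singleton, pvRpad]
    | cons b l =>
      rw [PySem.Chars.join_cons_cons]
      have := ih (by simp)
      simp only [List.append_assoc, List.cons_append, List.nil_append] at this ⊢
      rw [this]
      simp [pvRpad]

theorem pvRpad_append (a b : List (List Char)) : pvRpad (a ++ b) = pvRpad a ++ pvRpad b := by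
  induction a with
  | nil => simp [pvRpad]
  | cons t a ih => simp [pvRpad, ih]

-- an occurrence of a space-started pattern cannot start inside a clean token
theorem pvSkip_token {h X Y : List Char} (hcl : ∀ c ∈ h, pvNons c = true)
    (hin : ' ' :: X <:+: h ++ ' ' :: Y) : ' ' :: X <:+: ' ' :: Y := by
  induction h with
  | nil => simpa using hin
  | cons c h ih =>
    rw [List.cons_append] at hin
    rcases List.infix_cons_iff.mp hin with hp | hi
    · obtain ⟨hc, -⟩ := List.cons_prefix_cons.mp hp
      have : pvNons ' ' = false := by decide
      simp [← hc, this] at hcl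
    · exact ih (fun x hx => hcl x (by simp [hx])) hi

theorem pvHead_token {k v u w : List Char} (hk : ∀ c ∈ k, pvNons c = true)
    (hv : ∀ c ∈ v, pvNons c = true) (hp : k ++ ' ' :: u <+: v ++ ' ' :: w) :
    k = v ∧ u <+: w := by
  induction k generalizing v with
  | nil =>
    cases v with
    | nil => simpa using hp
    | cons c v =>
      rw [List.nil_append, List.cons_append] at hp
      obtain ⟨hc, -⟩ := List.cons_prefix_cons.mp hp
      have : pvNons ' ' = false := by decide
      simp [← hc, this] at hv
  | cons a k ih =>
    cases v with
    | nil =>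
      rw [List.cons_append, List.nil_append] at hp
      obtain ⟨hc, -⟩ := List.cons_prefix_cons.mp hp
      have : pvNons ' ' = false := by decide
      simp [hc, this] at hk
    | cons c v =>
      rw [List.cons_append, List.cons_append] at hp
      obtain ⟨hc, hp'⟩ := List.cons_prefix_cons.mp hp
      obtain ⟨hkv, huw⟩ := ih (fun x hx => hk x (by simp [hx]))
        (fun x hx => hv x (by simp [hx])) hp'
      exact ⟨by rw [hc, hkv], huw⟩

theorem pvRpad_prefix {ks vs : List (List Char)} (hks : ∀ t ∈ ks, pvClean t)
    (hvs : ∀ t ∈ vs, pvClean t) (hp : pvRpad ks <+: pvRpad vs) : ks <+: vs := by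
  induction ks generalizing vs with
  | nil => exact List.nil_prefix
  | cons k ks ih =>
    cases vs with
    | nil =>
      rw [pvRpad, pvRpad] at hp
      have := List.prefix_nil.mp hp
      simp at this
    | cons v vs =>
      rw [pvRpad, pvRpad] at hp
      obtain ⟨hkv, hp'⟩ := pvHead_token ((hks k (by simp)).2) ((hvs v (by simp)).2) hp
      exact List.cons_prefix_cons.mpr ⟨hkv,
        ih (fun t ht => hks t (by simp [ht])) (fun t ht => hvs t (by simp [ht])) hp'⟩

theorem pvWindow_pad {ks : List (List Char)} (i : Nat) :
    ∀ vs, ks <+: vs.drop i → (' ' :: pvRpad ks <:+: ' ' :: pvRpad vs) := by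
  induction i with
  | zero =>
    intro vs hpre
    rw [List.drop_zero] at hpre
    obtain ⟨r, hr⟩ := hpre
    refine List.IsPrefix.isInfix (List.cons_prefix_cons.mpr ⟨rfl, ?_⟩)
    rw [← hr, pvRpad_append]
    exact List.prefix_append _ _
  | succ i ih =>
    intro vs hpre
    cases vs with
    | nil =>
      rw [List.drop_nil] at hpre
      rw [List.prefix_nil.mp hpre]
    | cons v vs =>
      refine (ih vs (by simpa using hpre)).trans ?_
      refine List.IsSuffix.isInfix ?_
      have hdec : (' ' :: pvRpad (v :: vs)) = (' ' :: v) ++ (' ' :: pvRpad vs) := by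
        simp [pvRpad]
      rw [hdec]
      exact List.suffix_append _ _

-- padded infix ⇔ some window of tokens matches
theorem pvPadInfix {ks vs : List (List Char)} (hks : ∀ t ∈ ks, pvClean t) (hne : ks ≠ [])
    (hvs : ∀ t ∈ vs, pvClean t) :
    (' ' :: pvRpad ks <:+: ' ' :: pvRpad vs) ↔ ∃ i, ks <+: vs.drop i := by
  constructor
  · intro hin
    induction vs with
    | nil =>
      exfalso
      rcases ks with _ | ⟨k, ks'⟩
      · exact hne rfl
      · have hlen := hin.length_le
        simp [pvRpad] at hlen
    | cons v vs ih =>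
      rcases List.infix_cons_iff.mp hin with hp | hi
      · obtain ⟨-, hp'⟩ := List.cons_prefix_cons.mp hp
        exact ⟨0, by simpa using pvRpad_prefix hks hvs hp'⟩
      · rw [pvRpad] at hi
        obtain ⟨i, hpre⟩ := ih (fun t ht => hvs t (by simp [ht]))
          (pvSkip_token ((hvs v (by simp)).2) hi)
        exact ⟨i + 1, by simpa using hpre⟩
  · rintro ⟨i, hpre⟩
    exact pvWindow_pad i vs hpre


-- ----- glue between the String-level ports and the Chars-level lemmas -----

theorem pvStrTokensClean (s : String) : ∀ t ∈ PySem.Str.split₀ s, pvClean t.toList := by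
  intro t ht
  simp only [PySem.Str.split₀, pvSplit₀_eq, List.mem_map] at ht
  obtain ⟨ct, hct, rfl⟩ := ht
  simpa using pvSplit_clean ct hct

theorem pvCanon_clean {t : String} (h : pvClean t.toList) : pvClean (pvCanon t).toList := by
  rw [pvCanon]
  split
  · have htv : ("tv" : String).toList = ['t', 'v'] := rfl
    rw [pvClean, htv]
    refine ⟨by simp, ?_⟩
    intro c hc
    rcases List.mem_cons.mp hc with rfl | hc
    · decide
    · rcases List.mem_singleton.mp hc with rfl
      decide
  · exact h

theorem pvSpaceToList : (" " : String).toList = [' '] := by decide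

theorem pvStrF1 (s : String) :
    PySem.Str.split₀ (PySem.Str.strip s) = PySem.Str.split₀ s := by
  simp only [PySem.Str.split₀, PySem.Str.strip, String.toList_ofList,
    pvSplit₀_eq, pvSplit_strip]

theorem pvStrF2 (s : String) :
    PySem.Str.split₀ (PySem.Str.join " " (PySem.Str.split₀ s)) = PySem.Str.split₀ s := by
  have hclean : ∀ t ∈ (PySem.Str.split₀ s).map String.toList, pvClean t := by
    intro t ht
    simp only [List.mem_map] at ht
    obtain ⟨u, hu, rfl⟩ := ht
    exact pvStrTokensClean s u hu
  conv_lhs =>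
    rw [PySem.Str.split₀, PySem.Str.toList_join, pvSpaceToList, pvSplit₀_eq,
      pvSplit_join hclean]
  simp only [PySem.Str.split₀, pvSplit₀_eq, List.map_map]
  simp [Function.comp]

theorem pvLenJoin (s : String) :
    (PySem.Str.len (PySem.Str.join " " (PySem.Str.split₀ s)) == 0)
      = ((PySem.Str.split₀ s).length == 0) := by
  have hclean : ∀ t ∈ (PySem.Str.split₀ s).map String.toList, pvClean t := by
    intro t ht
    simp only [List.mem_map] at ht
    obtain ⟨u, hu, rfl⟩ := ht
    exact pvStrTokensClean s u hu
  rw [Bool.eq_iff_iff]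
  simp only [beq_iff_eq, PySem.Str.len, Nat.cast_eq_zero, List.length_eq_zero_iff,
    PySem.Str.toList_join, pvSpaceToList]
  rw [pvJoin_eq_nil hclean]
  simp [PySem.Str.split₀]

theorem pvMapPrefixIff (as bs : List String) :
    as.map String.toList <+: bs.map String.toList ↔ as <+: bs := by
  constructor
  · intro h
    rw [List.prefix_iff_eq_take, List.length_map, ← List.map_take] at h
    exact List.prefix_iff_eq_take.mpr
      ((List.map_injective_iff.mpr (fun a b hab => String.toList_inj.mp hab)) h)
  · intro h
    exact h.map _

-- A's sliding-window loop over canonical tokens, as a window proposition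
theorem pvWindowIff (ht kt : List String) (hne : kt ≠ []) :
    ((PySem.List.pyRange 0 ((ht.length : Int) - (kt.length : Int) + 1)).any
      (fun start =>
        ((PySem.List.slice ht (some start) (some (start + (kt.length : Int)))).zip kt).all
          (fun p => pvCanon p.1 == pvCanon p.2)) = true)
      ↔ ∃ i : Nat, kt.map pvCanon <+: (ht.map pvCanon).drop i := by
  rw [List.any_eq_true]
  constructor
  · rintro ⟨start, hmem, hall⟩
    rw [PySem.List.mem_pyRange_one] at hmem
    lift start to ℕ using hmem.1 with i
    have hiK : i + kt.length ≤ ht.length := by omega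
    have hslice : PySem.List.slice ht (some (i : Int)) (some ((i : Int) + (kt.length : Int)))
        = List.take kt.length (List.drop i ht) := by
      rw [show ((i : Int) + (kt.length : Int)) = ((i + kt.length : Nat) : Int) from by push_cast; ring,
        PySem.List.slice_natCast]
      congr 1
      omega
    rw [hslice] at hall
    have hlen : (List.take kt.length (List.drop i ht)).length = kt.length := by
      simp; omega
    have hmapeq := (pvZipAll_eq hlen).mp hall
    refine ⟨i, List.prefix_iff_eq_take.mpr ?_⟩
    rw [List.length_map, ← List.map_drop, ← List.map_take, ← hmapeq]
  · rintro ⟨i, hpre⟩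
    have hK1 : 1 ≤ kt.length := List.length_pos_iff.mpr hne
    have hlenle := hpre.length_le
    simp only [List.length_map, List.length_drop] at hlenle
    have hiK : i + kt.length ≤ ht.length := by omega
    refine ⟨(i : Int), PySem.List.mem_pyRange_one.mpr ⟨by positivity, by omega⟩, ?_⟩
    have hslice : PySem.List.slice ht (some (i : Int)) (some ((i : Int) + (kt.length : Int)))
        = List.take kt.length (List.drop i ht) := by
      rw [show ((i : Int) + (kt.length : Int)) = ((i + kt.length : Nat) : Int) from by push_cast; ring,
        PySem.List.slice_natCast]
      congr 1
      omega
    rw [hslice]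
    have hlen : (List.take kt.length (List.drop i ht)).length = kt.length := by
      simp; omega
    refine (pvZipAll_eq hlen).mpr ?_
    have := List.prefix_iff_eq_take.mp hpre
    rw [List.length_map, ← List.map_drop, ← List.map_take] at this
    exact this.symm

-- B's padded substring test, as the same window proposition
theorem pvPadIff (ht kt : List String) (hne : kt ≠ [])
    (hch : ∀ t ∈ ht, pvClean t.toList) (hck : ∀ t ∈ kt, pvClean t.toList) :
    (PySem.Str.isIn (" " ++ PySem.Str.join " " (kt.map pvCanon) ++ " ")
        (" " ++ PySem.Str.join " " (ht.map pvCanon) ++ " ") = true)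
      ↔ ∃ i : Nat, kt.map pvCanon <+: (ht.map pvCanon).drop i := by
  have hcleanK : ∀ t ∈ (kt.map pvCanon).map String.toList, pvClean t := by
    intro t ht'
    simp only [List.mem_map] at ht'
    obtain ⟨u, hu, rfl⟩ := ht'
    obtain ⟨v, hv, rfl⟩ := hu
    exact pvCanon_clean (hck v hv)
  have hcleanH : ∀ t ∈ (ht.map pvCanon).map String.toList, pvClean t := by
    intro t ht'
    simp only [List.mem_map] at ht'
    obtain ⟨u, hu, rfl⟩ := ht'
    obtain ⟨v, hv, rfl⟩ := hu
    exact pvCanon_clean (hch v hv)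
  have hneK : (kt.map pvCanon).map String.toList ≠ [] := by
    simp only [ne_eq, List.map_eq_nil_iff]
    exact hne
  have hpadK : (" " ++ PySem.Str.join " " (kt.map pvCanon) ++ " ").toList
      = ' ' :: pvRpad ((kt.map pvCanon).map String.toList) := by
    rw [String.toList_append, String.toList_append, PySem.Str.toList_join, pvSpaceToList,
      ← pvPad_eq hneK]
  rw [PySem.Str.isIn_iff_infix, hpadK]
  have hpadH : (" " ++ PySem.Str.join " " (ht.map pvCanon) ++ " ").toList
      = [' '] ++ PySem.Chars.join [' '] ((ht.map pvCanon).map String.toList) ++ [' '] := by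
    rw [String.toList_append, String.toList_append, PySem.Str.toList_join, pvSpaceToList]
  rcases hHe : (ht.map pvCanon).map String.toList with _ | ⟨v, vs⟩
  · -- all-whitespace haystack: no haystack tokens, both sides false
    have hHe' : ht = [] := by
      rcases ht with _ | ⟨a, l⟩
      · rfl
      · exact absurd hHe (by simp)
    subst hHe'
    rw [hpadH]
    constructor
    · intro hin
      exfalso
      have hlen := hin.length_le
      rcases hKe : (kt.map pvCanon).map String.toList with _ | ⟨k, ks'⟩
      · exact hneK hKe
      · have hkc : pvClean k := hcleanK k (by rw [hKe]; simp)
        have hkpos : 0 < k.length := List.length_pos_iff.mpr hkc.1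
        rw [hKe] at hlen
        simp [pvRpad, PySem.Chars.join_nil] at hlen
        omega
    · rintro ⟨i, hpre⟩
      exfalso
      have hknil : kt.map pvCanon = [] := by simpa using hpre
      exact hne (by simpa using hknil)
  · rw [hpadH, pvPad_eq (by rw [hHe]; exact List.cons_ne_nil _ _),
      pvPadInfix hcleanK hneK hcleanH]
    constructor
    · rintro ⟨i, hpre⟩
      refine ⟨i, ?_⟩
      rw [← List.map_drop] at hpre
      exact (pvMapPrefixIff _ _).mp hpre
    · rintro ⟨i, hpre⟩
      exact ⟨i, by rw [← List.map_drop]; exact hpre.map _⟩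

-- ===== VERDICT (by name: the statement is the Claim_ definition above) =====
theorem keyword_matches_py_spec : Claim_equal_keyword_matches_py := by
  intro haystack keyword _hdom
  unfold Spec_keyword_matches_py
  simp only [keyword_matches_py, keyword_matches_py_alt]
  rw [pvStrF1 keyword, pvStrF2 keyword, pvLenJoin keyword]
  simp only [pvEquiv_eq]
  by_cases hc : ((PySem.Str.split₀ keyword).length == 0 || PySem.Str.len haystack == 0) = true
  · rw [if_pos hc, if_pos hc]
  · have hguard : ¬ (((PySem.Str.split₀ keyword).length == 0
        || PySem.Str.len haystack == 0) = true) := hc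
    simp only [Bool.or_eq_true, not_or] at hc
    obtain ⟨hc1, hc2⟩ := hc
    rw [if_neg hguard, if_neg hguard, if_neg hc1]
    have hne : PySem.Str.split₀ keyword ≠ [] := by
      intro hnil
      exact hc1 (by simp [hnil])
    by_cases h3 : (((PySem.Str.split₀ keyword).length : Nat) == 1) = true
    · rw [if_pos h3, if_pos h3]
    · rw [if_neg h3, if_neg h3]
      by_cases h4 : PySem.Str.isIn (PySem.Str.join " " (PySem.Str.split₀ keyword))
          (PySem.Str.join " " (PySem.Str.split₀ haystack)) = true
      · rw [if_pos h4, if_pos h4]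
      · rw [if_neg h4, if_neg h4]
        rw [Bool.eq_iff_iff]
        exact (pvWindowIff _ _ hne).trans
          (pvPadIff _ _ hne (pvStrTokensClean haystack) (pvStrTokensClean keyword)).symm
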